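-- pv_equiv track=rewrite | github.com/981377660LMT/algorithm-study | 14_并查集/经典题/每个对选一个点(每条边选一个点)/B - Reversible Cards.py | selectOneFromEachPair
-- ===== SOURCE A (Python) =====
-- from collections import defaultdict, deque
-- from typing import DefaultDict, List, Tuple
--
-- class UnionFindGraphArray:
--     """并查集维护无向图每个连通块的边数和顶点数."""
--
--     __slots__ = ("part", "_parent", "vertex", "edge")
--
--     def __init__(self, n: int):
--         self.part = n
--         self.vertex = [1] * n  # 每个联通块的顶点数
--         self.edge = [0] * n  # 每个联通块的边数
--         self._parent = list(range(n))
--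
--     def find(self, x: int) -> int:
--         while self._parent[x] != x:
--             self._parent[x] = self._parent[self._parent[x]]
--             x = self._parent[x]
--         return x
--
--     def union(self, x: int, y: int) -> bool:
--         rootX = self.find(x)
--         rootY = self.find(y)
--         if rootX == rootY:
--             self.edge[rootX] += 1  # !两个顶点已经在同一个连通块了，这个连通块的边数+1
--             return False
--         if self.vertex[rootX] > self.vertex[rootY]:
--             rootX, rootY = rootY, rootX
--         self._parent[rootX] = rootY
--         self.vertex[rootY] += self.vertex[rootX]
--         self.edge[rootY] += self.edge[rootX] + 1
--         self.part -= 1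
--         return True
--
--     def isConnected(self, x: int, y: int) -> bool:
--         return self.find(x) == self.find(y)
--
--     def getGroups(self) -> DefaultDict[int, List[int]]:
--         groups = defaultdict(list)
--         for i in range(len(self._parent)):
--             root = self.find(i)
--             groups[root].append(i)
--         return groups
--
--     def getSize(self, key: int) -> int:
--         return self.vertex[self.find(key)]
--
--     def getEdge(self, key: int) -> int:
--         return self.edge[self.find(key)]
--
--     def __repr__(self) -> str:
--         return "\n".join(f"{root}: {member}" for root, member in self.getGroups().items())
--
-- def selectOneFromEachPair(pairs: List[Tuple[int, int]]) -> int: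
--     """从每个对中恰好选一个数，最多能选出多少个不同的数.
--     对每个大小为m的连通块,树的贡献为m-1,环的贡献为m.
--     """
--     id = dict()
--     for u, v in pairs:
--         id.setdefault(u, len(id))
--         id.setdefault(v, len(id))
--
--     n = len(id)
--     uf = UnionFindGraphArray(n)
--     for u, v in pairs:
--         uf.union(id[u], id[v])
--
--     res = 0
--     for root, g in uf.getGroups().items():
--         isTree = uf.edge[root] == len(g) - 1
--         res += len(g) - isTree
--     return res
-- ===== SOURCE B (Python) =====
-- from typing import List, Tuple
--
--
-- def selectOneFromEachPair(pairs: List[Tuple[int, int]]) -> int: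
--     """From each pair pick one number; maximise the count of distinct picks.
--
--     Partition-merging instead of union-find: keep an explicit list of
--     components (members, inner-edge count); each pair either adds an inner
--     edge or merges two components.  A component with m vertices contributes
--     m if it has a cycle (edges != m-1), else m-1.
--     """
--     id = dict()
--     for u, v in pairs:
--         id.setdefault(u, len(id))
--         id.setdefault(v, len(id))
--
--     comps = [([i], 0) for i in range(len(id))]  # (members, inner edge count)
--     for u, v in pairs:
--         a, b = id[u], id[v]
--         i = next(k for k, c in enumerate(comps) if a in c[0])
--         j = next(k for k, c in enumerate(comps) if b in c[0])
--         if i == j: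
--             comps[i] = (comps[i][0], comps[i][1] + 1)
--         else:
--             comps[i] = (comps[i][0] + comps[j][0], comps[i][1] + comps[j][1] + 1)
--             comps.pop(j)
--
--     return sum(len(m) - (e == len(m) - 1) for m, e in comps)
-- ===== Notes on version B (the rewrite author's own statement) =====
-- stated objective: simpler
-- what changed: Replaces the union-find structure (parent array with path halving, per-root vertex/edge counters, final grouping pass) by an explicit list of components (member list, inner-edge count) that is merged pair by pair and summed directly.
import Mathlib
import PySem

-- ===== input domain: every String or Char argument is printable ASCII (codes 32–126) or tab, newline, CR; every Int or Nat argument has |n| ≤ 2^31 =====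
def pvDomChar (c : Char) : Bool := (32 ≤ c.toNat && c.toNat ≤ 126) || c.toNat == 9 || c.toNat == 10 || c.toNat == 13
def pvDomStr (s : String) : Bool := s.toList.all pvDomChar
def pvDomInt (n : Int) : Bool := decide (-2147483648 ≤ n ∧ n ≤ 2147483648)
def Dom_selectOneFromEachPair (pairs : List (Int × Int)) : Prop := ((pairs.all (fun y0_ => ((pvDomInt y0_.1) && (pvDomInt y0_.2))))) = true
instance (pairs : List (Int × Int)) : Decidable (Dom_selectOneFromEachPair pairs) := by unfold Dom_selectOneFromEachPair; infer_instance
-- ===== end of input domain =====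

-- B replaces A's union-find (parent array with path halving, per-root vertex/edge
-- counters, final grouping pass) by an explicit list of components that is merged
-- pair by pair and summed directly; objective: simpler.


-- ===== PORT A =====
-- UnionFindGraphArray: part / vertex / edge / _parent
structure UFState where
  part : Int
  vertex : List Int
  edge : List Int
  parent : List Nat
deriving Repr, DecidableEq

-- __init__(n)
def ufInit (n : Nat) : UFState :=
  { part := (n : Int), vertex := List.replicate n 1, edge := List.replicate n 0,
    parent := List.range n }

-- the body of `find`'s while-loop (path halving); fuel = len(parent) bounds the
-- number of iterations on every state the Python code reaches (the depth of a
-- node strictly decreases each iteration), so the port is exact there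
def findLoop : List Nat → Nat → Nat → List Nat × Nat
  | p, x, 0 => (p, x)
  | p, x, fuel+1 =>
    if p.getD x 0 = x then (p, x)
    else
      let p' := p.set x (p.getD (p.getD x 0) 0)
      findLoop p' (p'.getD x 0) fuel

-- find(x)
def ufFind (uf : UFState) (x : Nat) : UFState × Nat :=
  let r := findLoop uf.parent x uf.parent.length
  ({ uf with parent := r.1 }, r.2)

-- union(x, y)
def ufUnion (uf : UFState) (x y : Nat) : UFState × Bool :=
  let fx := ufFind uf x
  let fy := ufFind fx.1 y
  let uf1 := fy.1
  let rootX := fx.2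
  let rootY := fy.2
  if rootX = rootY then
    ({ uf1 with edge := uf1.edge.modify rootX (· + 1) }, false)
  else
    let rp := if uf1.vertex.getD rootX 0 > uf1.vertex.getD rootY 0 then (rootY, rootX) else (rootX, rootY)
    ({ part := uf1.part - 1,
       vertex := uf1.vertex.modify rp.2 (· + uf1.vertex.getD rp.1 0),
       edge := uf1.edge.modify rp.2 (· + uf1.edge.getD rp.1 0 + 1),
       parent := uf1.parent.set rp.1 rp.2 }, true)

-- getGroups()
def ufGetGroups (uf : UFState) : UFState × PySem.Dict Nat (List Nat) :=
  (List.range uf.parent.length).foldl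
    (fun s i =>
      let f := ufFind s.1 i
      (f.1, s.2.modify f.2 [] (· ++ [i])))
    (uf, PySem.Dict.empty)

-- id = dict(); for u, v in pairs: id.setdefault(u, len(id)); id.setdefault(v, len(id))
def buildIdA (pairs : List (Int × Int)) : PySem.Dict Int Nat :=
  pairs.foldl (fun d uv => let d1 := d.setdefault uv.1 d.size; d1.setdefault uv.2 d1.size)
    PySem.Dict.empty

def selectOneFromEachPair (pairs : List (Int × Int)) : Int :=
  let idm := buildIdA pairs
  let n := idm.size
  let uf := pairs.foldl (fun uf uv => (ufUnion uf (idm.getD uv.1 0) (idm.getD uv.2 0)).1) (ufInit n)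
  let g := ufGetGroups uf
  g.2.items.foldl
    (fun res rg =>
      let isTree := g.1.edge.getD rg.1 0 = (rg.2.length : Int) - 1
      res + (rg.2.length : Int) - (if isTree then 1 else 0))
    0

-- ===== PORT B =====
-- id = dict(); same first loop as Source B
def buildIdB (pairs : List (Int × Int)) : PySem.Dict Int Nat :=
  pairs.foldl (fun d uv => let d1 := d.setdefault uv.1 d.size; d1.setdefault uv.2 d1.size)
    PySem.Dict.empty

-- body of Source B's merging loop, for one pair already translated to ids a, b
def mergeCore (comps : List (List Nat × Int)) (a b : Nat) : List (List Nat × Int) :=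
  match comps.findIdx? (fun c => c.1.contains a), comps.findIdx? (fun c => c.1.contains b) with
  | some i, some j =>
    if i = j then comps.modify i (fun c => (c.1, c.2 + 1))
    else
      let cj := comps.getD j ([], 0)
      (comps.modify i (fun c => (c.1 ++ cj.1, c.2 + cj.2 + 1))).eraseIdx j
  | _, _ => comps   -- unreachable: every id value lies in some component

def mergeStep (idm : PySem.Dict Int Nat) (comps : List (List Nat × Int)) (uv : Int × Int) :
    List (List Nat × Int) :=
  mergeCore comps (idm.getD uv.1 0) (idm.getD uv.2 0)

def selectOneFromEachPair_alt (pairs : List (Int × Int)) : Int :=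
  let idm := buildIdB pairs
  let comps := (List.range idm.size).map (fun i => ([i], (0 : Int)))
  let final := pairs.foldl (mergeStep idm) comps
  final.foldl
    (fun r c => r + (c.1.length : Int) - (if c.2 = (c.1.length : Int) - 1 then 1 else 0))
    0

-- ===== PRECONDITION & SPEC =====
def Spec_selectOneFromEachPair (pairs : List (Int × Int)) (out : Int) : Prop := out = selectOneFromEachPair_alt pairs
instance (pairs : List (Int × Int)) (out : Int) : Decidable (Spec_selectOneFromEachPair pairs out) := by unfold Spec_selectOneFromEachPair; infer_instance

-- ===== CLAIM (what is proved, stated in full; the proofs are below) =====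
def Claim_equal_selectOneFromEachPair : Prop := ∀ (pairs : List (Int × Int)), Dom_selectOneFromEachPair pairs → Spec_selectOneFromEachPair pairs (selectOneFromEachPair pairs)

-- ===== LEMMAS AND PROOFS =====


-- entry of a `set` list, default form
lemma pv_getD_set {α : Type} (p : List α) (x : Nat) (v : α) (z : Nat) (dflt : α)
    (hx : x < p.length) :
    (p.set x v).getD z dflt = if z = x then v else p.getD z dflt := by
  rcases eq_or_ne z x with h | h
  · subst h
    rw [if_pos rfl, List.getD, List.getElem?_set, if_pos rfl, if_pos hx]
    rfl
  · rw [List.getD, List.getD, List.getElem?_set, if_neg (Ne.symm h), if_neg h]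

-- entry of a `modify` list, default form
lemma pv_getD_modify {α : Type} (p : List α) (x : Nat) (f : α → α) (z : Nat) (dflt : α)
    (hx : x < p.length) :
    (p.modify x f).getD z dflt = if z = x then f (p.getD z dflt) else p.getD z dflt := by
  rcases eq_or_ne z x with h | h
  · subst h
    rw [List.getD, List.getD, List.getElem?_modify, List.getElem?_eq_getElem hx]
    simp
  · rw [List.getD, List.getD, List.getElem?_modify, if_neg h]
    cases p[z]? <;> simp [Ne.symm h]

-- `modify` that keeps the first component keeps the map of first components
lemma pv_map_fst_modify {α β : Type} (l : List (α × β)) (i : Nat) (g : α × β → β) :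
    (l.modify i (fun c => (c.1, g c))).map Prod.fst = l.map Prod.fst := by
  apply List.ext_getElem
  · simp
  · intro k h1 h2
    simp only [List.getElem_map]
    rw [List.getElem_modify]
    split <;> simp_all

-- membership in a modified list, by position
lemma pv_mem_modify {α : Type} (l : List α) (i : Nat) (f : α → α) (c : α)
    (hc : c ∈ l.modify i f) :
    (∃ h : i < l.length, c = f (l[i]'h)) ∨ ∃ k, ∃ hk : k < l.length, k ≠ i ∧ c = l[k]'hk := by
  by_cases hi : i < l.length
  · rw [List.modify_eq_take_cons_drop hi] at hc
    rcases List.mem_append.mp hc with h | h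
    · obtain ⟨k, hk, hck⟩ := List.getElem_of_mem h
      have hkl : k < i := by simp at hk; omega
      right
      refine ⟨k, by omega, by omega, ?_⟩
      rw [← hck]
      simp [List.getElem_take]
    · rcases List.mem_cons.mp h with rfl | h
      · exact Or.inl ⟨hi, rfl⟩
      · obtain ⟨k, hk, hck⟩ := List.getElem_of_mem h
        have hkl : k < l.length - (i+1) := by simp at hk; omega
        right
        refine ⟨i + 1 + k, by omega, by omega, ?_⟩
        rw [← hck]
        simp [List.getElem_drop]
  · right
    rw [List.modify_eq_self (by omega)] at hc
    obtain ⟨k, hk, hck⟩ := List.getElem_of_mem hc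
    exact ⟨k, hk, by omega, hck.symm⟩

-- ===== the parent array as a forest =====

-- the value `find` converges to, computed with explicit fuel
def rootN (p : List Nat) : Nat → Nat → Nat
  | 0, x => x
  | fuel+1, x => if p.getD x 0 = x then x else rootN p fuel (p.getD x 0)

def proot (p : List Nat) (x : Nat) : Nat := rootN p p.length x

-- p is an in-range parent array whose non-root edges strictly decrease d
def Good (d : Nat → Nat) (p : List Nat) : Prop :=
  (∀ x, x < p.length → p.getD x 0 < p.length) ∧
    (∀ x, x < p.length → p.getD x 0 ≠ x → d (p.getD x 0) < d x)

def Forest (p : List Nat) : Prop := ∃ d, Good d p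

lemma rootN_zero (p : List Nat) (x : Nat) : rootN p 0 x = x := rfl

lemma rootN_succ (p : List Nat) (f x : Nat) :
    rootN p (f+1) x = if p.getD x 0 = x then x else rootN p f (p.getD x 0) := rfl

lemma rootN_of_root {p : List Nat} {x : Nat} (hr : p.getD x 0 = x) :
    ∀ f, rootN p f x = x := by
  intro f
  cases f with
  | zero => rfl
  | succ f => rw [rootN_succ, if_pos hr]

lemma proot_of_root {p : List Nat} {x : Nat} (hr : p.getD x 0 = x) : proot p x = x :=
  rootN_of_root hr _

-- every Good d can be replaced by one bounded by the length
lemma pv_normalize {d : Nat → Nat} {p : List Nat} (hg : Good d p) :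
    ∃ d', Good d' p ∧ ∀ x, d' x ≤ p.length := by
  refine ⟨fun x => ((Finset.range p.length).filter (fun y => d y < d x)).card,
    ⟨hg.1, ?_⟩, ?_⟩
  · intro x hx hnr
    apply Finset.card_lt_card
    rw [Finset.ssubset_def]
    constructor
    · intro y hy
      simp only [Finset.mem_filter, Finset.mem_range] at *
      exact ⟨hy.1, hy.2.trans (hg.2 x hx hnr)⟩
    · intro hsub
      have hmem : p.getD x 0 ∈ (Finset.range p.length).filter (fun y => d y < d x) :=
        Finset.mem_filter.mpr ⟨Finset.mem_range.mpr (hg.1 x hx), hg.2 x hx hnr⟩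
      have := hsub hmem
      simp [Finset.mem_filter] at this
  · intro x
    calc ((Finset.range p.length).filter (fun y => d y < d x)).card
        ≤ (Finset.range p.length).card := Finset.card_filter_le _ _
      _ = p.length := Finset.card_range _

lemma rootN_spec {d : Nat → Nat} {p : List Nat} (hg : Good d p) :
    ∀ f x, x < p.length → d x ≤ f →
      p.getD (rootN p f x) 0 = rootN p f x ∧ rootN p f x < p.length ∧
        ∀ g, d x ≤ g → rootN p g x = rootN p f x := by
  intro f
  induction f with
  | zero =>
    intro x hx hd
    by_cases hr : p.getD x 0 = x
    · exact ⟨by rw [rootN_zero]; exact hr, by rw [rootN_zero]; exact hx,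
        fun g _ => by rw [rootN_of_root hr g, rootN_zero]⟩
    · exact absurd (hg.2 x hx hr) (by omega)
  | succ f ih =>
    intro x hx hd
    by_cases hr : p.getD x 0 = x
    · exact ⟨by rw [rootN_of_root hr]; exact hr, by rw [rootN_of_root hr]; exact hx,
        fun g _ => by rw [rootN_of_root hr g, rootN_of_root hr]⟩
    · have hsx : p.getD x 0 < p.length := hg.1 x hx
      have hdx : d (p.getD x 0) < d x := hg.2 x hx hr
      have H := ih (p.getD x 0) hsx (by omega)
      refine ⟨?_, ?_, ?_⟩
      · rw [rootN_succ, if_neg hr]; exact H.1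
      · rw [rootN_succ, if_neg hr]; exact H.2.1
      · intro g hdg
        cases g with
        | zero => omega
        | succ g' =>
          rw [rootN_succ, if_neg hr, rootN_succ, if_neg hr]
          exact H.2.2 g' (by omega)

lemma proot_isRoot {d : Nat → Nat} {p : List Nat} (hg : Good d p)
    (hb : ∀ y, d y ≤ p.length) {x : Nat} (hx : x < p.length) :
    p.getD (proot p x) 0 = proot p x :=
  (rootN_spec hg p.length x hx (hb x)).1

lemma proot_lt {d : Nat → Nat} {p : List Nat} (hg : Good d p)
    (hb : ∀ y, d y ≤ p.length) {x : Nat} (hx : x < p.length) :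
    proot p x < p.length :=
  (rootN_spec hg p.length x hx (hb x)).2.1

lemma proot_step {d : Nat → Nat} {p : List Nat} (hg : Good d p)
    (hb : ∀ y, d y ≤ p.length) {x : Nat} (hx : x < p.length) :
    proot p (p.getD x 0) = proot p x := by
  by_cases hr : p.getD x 0 = x
  · rw [hr]
  · have hsx : p.getD x 0 < p.length := hg.1 x hx
    have hdx : d (p.getD x 0) < d x := hg.2 x hx hr
    have hxb : d x ≤ p.length := hb x
    obtain ⟨m, hm⟩ : ∃ m, p.length = m + 1 := ⟨p.length - 1, by omega⟩
    have h1 : proot p x = rootN p m (p.getD x 0) := by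
      show rootN p p.length x = _
      rw [hm, rootN_succ, if_neg hr]
    have h2 : proot p (p.getD x 0) = rootN p m (p.getD x 0) :=
      (rootN_spec hg m (p.getD x 0) hsx (by omega)).2.2 p.length (hb _)
    rw [h1, h2]

-- same root after following the parent pointer twice
lemma proot_gp {d : Nat → Nat} {p : List Nat} (hg : Good d p)
    (hb : ∀ y, d y ≤ p.length) {x : Nat} (hx : x < p.length) :
    proot p (p.getD (p.getD x 0) 0) = proot p x := by
  rw [proot_step hg hb (hg.1 x hx), proot_step hg hb hx]


-- one path-halving assignment preserves the forest and every root
lemma pv_halve {d : Nat → Nat} {p : List Nat} (hg : Good d p)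
    (hb : ∀ y, d y ≤ p.length) {x : Nat} (hx : x < p.length)
    (hnr : p.getD x 0 ≠ x) :
    Good d (p.set x (p.getD (p.getD x 0) 0)) ∧
      (∀ z, (p.set x (p.getD (p.getD x 0) 0)).getD z 0 = z ↔ p.getD z 0 = z) ∧
      (∀ z, z < p.length → proot (p.set x (p.getD (p.getD x 0) 0)) z = proot p z) := by
  set gp := p.getD (p.getD x 0) 0 with hgp
  have hpx : p.getD x 0 < p.length := hg.1 x hx
  have hgpl : gp < p.length := hg.1 _ hpx
  have hdgp : d gp < d x := by
    by_cases hr2 : p.getD (p.getD x 0) 0 = p.getD x 0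
    · rw [hgp, hr2]; exact hg.2 x hx hnr
    · exact lt_trans (hg.2 _ hpx hr2) (hg.2 x hx hnr)
  have hlen : (p.set x gp).length = p.length := by simp
  have hget : ∀ z, (p.set x gp).getD z 0 = if z = x then gp else p.getD z 0 :=
    fun z => pv_getD_set p x gp z 0 hx
  have hgpx : gp ≠ x := fun h => absurd (h ▸ hdgp) (by omega)
  have hroots : ∀ z, (p.set x gp).getD z 0 = z ↔ p.getD z 0 = z := by
    intro z
    rw [hget z]
    rcases eq_or_ne z x with hzx | hzx
    · rw [if_pos hzx, hzx]
      exact ⟨fun h => absurd h hgpx, fun h => absurd h hnr⟩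
    · rw [if_neg hzx]
  have hGood : Good d (p.set x gp) := by
    constructor
    · intro z hz
      rw [hlen] at hz ⊢
      rw [hget z]
      split
      · exact hgpl
      · exact hg.1 z hz
    · intro z hz hnr'
      rw [hlen] at hz
      rw [hget z] at hnr' ⊢
      rcases eq_or_ne z x with hzx | hzx
      · rw [if_pos hzx] at hnr' ⊢
        rw [hzx]
        exact hdgp
      · rw [if_neg hzx] at hnr' ⊢
        exact hg.2 z hz hnr'
  have hb' : ∀ y, d y ≤ (p.set x gp).length := by rw [hlen]; exact hb
  refine ⟨hGood, hroots, ?_⟩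
  have main : ∀ k z, z < p.length → d z = k → proot (p.set x gp) z = proot p z := by
    intro k
    induction k using Nat.strong_induction_on with
    | _ k ih =>
      intro z hz hdz
      by_cases hr : p.getD z 0 = z
      · rw [proot_of_root ((hroots z).mpr hr), proot_of_root hr]
      · have hz' : z < (p.set x gp).length := by rw [hlen]; exact hz
        rcases eq_or_ne z x with hzx | hzx
        · rw [hzx] at hz hz' hdz ⊢
          have hstep : (p.set x gp).getD x 0 = gp := by rw [hget x, if_pos rfl]
          have h1 : proot (p.set x gp) x = proot (p.set x gp) gp := by
            rw [← proot_step hGood hb' hz', hstep]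
          rw [h1, ih (d gp) (by omega) gp hgpl rfl]
          rw [hgp, proot_gp hg hb hx]
        · have hstep : (p.set x gp).getD z 0 = p.getD z 0 := by rw [hget z, if_neg hzx]
          have h1 : proot (p.set x gp) z = proot (p.set x gp) (p.getD z 0) := by
            rw [← proot_step hGood hb' hz', hstep]
          have hw : p.getD z 0 < p.length := hg.1 z hz
          have hdw : d (p.getD z 0) < d z := hg.2 z hz hr
          rw [h1, ih (d (p.getD z 0)) (by omega) _ hw rfl, proot_step hg hb hz]
  exact fun z hz => main (d z) z hz rfl

-- the while-loop of `find`: returns the root, preserves length, the forest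
-- (with the SAME measure), the set of roots, and every node's root
lemma findLoop_spec {d : Nat → Nat} :
    ∀ (fuel : Nat) (p : List Nat) (x : Nat), Good d p → (∀ y, d y ≤ p.length) →
      x < p.length → d x ≤ fuel →
      (findLoop p x fuel).2 = proot p x ∧
      (findLoop p x fuel).1.length = p.length ∧
      Good d (findLoop p x fuel).1 ∧
      (∀ y, d y ≤ (findLoop p x fuel).1.length) ∧
      (∀ z, (findLoop p x fuel).1.getD z 0 = z ↔ p.getD z 0 = z) ∧
      (∀ z, z < p.length → proot (findLoop p x fuel).1 z = proot p z) := by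
  intro fuel
  induction fuel with
  | zero =>
    intro p x hg hb hx hd
    have hr : p.getD x 0 = x := by
      by_contra hnr
      exact absurd (hg.2 x hx hnr) (by omega)
    exact ⟨(proot_of_root hr).symm, rfl, hg, hb, fun _ => Iff.rfl, fun _ _ => rfl⟩
  | succ fuel ih =>
    intro p x hg hb hx hd
    by_cases hr : p.getD x 0 = x
    · rw [show findLoop p x (fuel+1) = (p, x) by rw [findLoop, if_pos hr]]
      exact ⟨(proot_of_root hr).symm, rfl, hg, hb, fun _ => Iff.rfl, fun _ _ => rfl⟩
    · have H := pv_halve hg hb hx hr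
      set p' := p.set x (p.getD (p.getD x 0) 0) with hp'
      have hlen : p'.length = p.length := by simp [hp']
      have hpx : p.getD x 0 < p.length := hg.1 x hx
      have hgpl : p.getD (p.getD x 0) 0 < p.length := hg.1 _ hpx
      have hgetx : p'.getD x 0 = p.getD (p.getD x 0) 0 := by
        rw [hp', pv_getD_set p x _ x 0 hx, if_pos rfl]
      have hstep : findLoop p x (fuel+1) = findLoop p' (p'.getD x 0) fuel := by
        rw [findLoop, if_neg hr]
      have hdgp : d (p.getD (p.getD x 0) 0) < d x := by
        by_cases hr2 : p.getD (p.getD x 0) 0 = p.getD x 0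
        · rw [hr2]; exact hg.2 x hx hr
        · exact lt_trans (hg.2 _ hpx hr2) (hg.2 x hx hr)
      have hb' : ∀ y, d y ≤ p'.length := by rw [hlen]; exact hb
      have hx' : p'.getD x 0 < p'.length := by rw [hlen, hgetx]; exact hgpl
      have hd' : d (p'.getD x 0) ≤ fuel := by rw [hgetx]; omega
      have IH := ih p' (p'.getD x 0) H.1 hb' hx' hd'
      rw [hstep]
      refine ⟨?_, ?_, IH.2.2.1, ?_, ?_, ?_⟩
      · rw [IH.1, hgetx, H.2.2 _ hgpl, proot_gp hg hb hx]
      · rw [IH.2.1, hlen]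
      · exact IH.2.2.2.1
      · intro z
        rw [IH.2.2.2.2.1 z, H.2.1 z]
      · intro z hz
        have hz' : z < p'.length := by rw [hlen]; exact hz
        rw [IH.2.2.2.2.2 z hz', H.2.2 z hz]


-- linking one root under another: the forest survives and roots are renamed
lemma pv_link {d : Nat → Nat} {p : List Nat} (hg : Good d p) (hb : ∀ y, d y ≤ p.length)
    {rx ry : Nat} (hrx : p.getD rx 0 = rx) (hry : p.getD ry 0 = ry) (hne : rx ≠ ry)
    (hxn : rx < p.length) (hyn : ry < p.length) :
    Forest (p.set rx ry) ∧
      ∀ z, z < p.length → proot (p.set rx ry) z =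
        if proot p z = rx then ry else proot p z := by
  set d' : Nat → Nat := fun z => if proot p z = rx then d z + d ry + 1 else d z with hd'
  have hval : ∀ z, d' z = if proot p z = rx then d z + d ry + 1 else d z := fun z => rfl
  have hget : ∀ z, (p.set rx ry).getD z 0 = if z = rx then ry else p.getD z 0 :=
    fun z => pv_getD_set p rx ry z 0 hxn
  have hlen : (p.set rx ry).length = p.length := by simp
  have hprx : proot p rx = rx := proot_of_root hrx
  have hpry : proot p ry = ry := proot_of_root hry
  have hGood : Good d' (p.set rx ry) := by
    constructor
    · intro z hz
      rw [hlen] at hz ⊢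
      rw [hget z]
      split
      · exact hyn
      · exact hg.1 z hz
    · intro z hz hnr'
      rw [hlen] at hz
      rw [hget z] at hnr' ⊢
      rcases eq_or_ne z rx with hzx | hzx
      · rw [if_pos hzx] at hnr' ⊢
        rw [hzx]
        show d' ry < d' rx
        rw [hval ry, hval rx, hpry, hprx, if_neg (Ne.symm hne), if_pos rfl]
        omega
      · rw [if_neg hzx] at hnr' ⊢
        have hst : proot p (p.getD z 0) = proot p z := proot_step hg hb hz
        have hdz : d (p.getD z 0) < d z := hg.2 z hz hnr'
        show d' _ < d' z
        rw [hval (p.getD z 0), hval z, hst]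
        split <;> omega
  obtain ⟨e, hge, hbe⟩ := pv_normalize hGood
  refine ⟨⟨e, hge⟩, ?_⟩
  have hroot_ry' : (p.set rx ry).getD ry 0 = ry := by
    rw [hget ry, if_neg (Ne.symm hne)]; exact hry
  have main : ∀ k z, z < p.length → e z = k →
      proot (p.set rx ry) z = if proot p z = rx then ry else proot p z := by
    intro k
    induction k using Nat.strong_induction_on with
    | _ k ih =>
      intro z hz hez
      rcases eq_or_ne z rx with hzx | hzx
      · rw [hzx]
        have h1 : proot (p.set rx ry) rx = proot (p.set rx ry) ry := by
          rw [← proot_step hge hbe (by rw [hlen]; exact hxn), hget rx, if_pos rfl]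
        rw [h1, proot_of_root hroot_ry', hprx, if_pos rfl]
      · by_cases hr : p.getD z 0 = z
        · have hz0 : (p.set rx ry).getD z 0 = z := by rw [hget z, if_neg hzx]; exact hr
          rw [proot_of_root hz0, proot_of_root hr, if_neg hzx]
        · have hst' : (p.set rx ry).getD z 0 = p.getD z 0 := by rw [hget z, if_neg hzx]
          have hw : p.getD z 0 < p.length := hg.1 z hz
          have h1 : proot (p.set rx ry) z = proot (p.set rx ry) (p.getD z 0) := by
            rw [← proot_step hge hbe (by rw [hlen]; exact hz), hst']
          have hew : e (p.getD z 0) < e z := by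
            have := hge.2 z (by rw [hlen]; exact hz) (by rw [hst']; exact hr)
            rwa [hst'] at this
          rw [h1, ih (e (p.getD z 0)) (by omega) _ hw rfl, proot_step hg hb hz]
  exact fun z hz => main (e z) z hz rfl

-- a list is a permutation of any element pulled to the front
lemma pv_perm_eraseIdx {α : Type} (l : List α) (j : Nat) (hj : j < l.length) :
    l.Perm (l[j] :: l.eraseIdx j) := by
  conv_lhs => rw [← List.take_append_drop j l, ← List.getElem_cons_drop hj]
  rw [List.eraseIdx_eq_take_drop_succ]
  exact List.perm_middle

-- modifying entry i, up to permutation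
lemma pv_perm_modify {α : Type} (l : List α) (i : Nat) (f : α → α) (hi : i < l.length) :
    (l.modify i f).Perm (f l[i] :: l.eraseIdx i) := by
  rw [List.modify_eq_take_cons_drop hi, List.eraseIdx_eq_take_drop_succ]
  exact List.perm_middle

-- modifying entry i and erasing entry j ≠ i, up to permutation
lemma pv_surgery {α : Type} :
    ∀ (l : List α) (i j : Nat) (f : α → α) (hi : i < l.length) (hj : j < l.length),
      i ≠ j →
      ∃ rest : List α, l.Perm ((l[i]'hi) :: (l[j]'hj) :: rest) ∧
        ((l.modify i f).eraseIdx j).Perm (f (l[i]'hi) :: rest) := by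
  intro l
  induction l with
  | nil => intro i j f hi; simp at hi
  | cons x t ih =>
    intro i j f hi hj hij
    cases i with
    | zero =>
      cases j with
      | zero => exact absurd rfl hij
      | succ j' =>
        have hj' : j' < t.length := by simpa using hj
        refine ⟨t.eraseIdx j', ?_, ?_⟩
        · simpa using (pv_perm_eraseIdx t j' hj').cons x
        · rw [List.modify_zero_cons, List.eraseIdx_cons_succ]
          simp
    | succ i' =>
      have hi' : i' < t.length := by simpa using hi
      cases j with
      | zero =>
        refine ⟨t.eraseIdx i', ?_, ?_⟩
        · have h1 : (x :: t).Perm (x :: t[i'] :: t.eraseIdx i') :=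
            (pv_perm_eraseIdx t i' hi').cons x
          have h2 : (x :: t[i'] :: t.eraseIdx i').Perm (t[i'] :: x :: t.eraseIdx i') :=
            List.Perm.swap _ _ _
          simpa using h1.trans h2
        · rw [List.modify_succ_cons, List.eraseIdx_cons_zero]
          simpa using pv_perm_modify t i' f hi'
      | succ j' =>
        have hj' : j' < t.length := by simpa using hj
        obtain ⟨rest, h1, h2⟩ := ih i' j' f hi' hj' (by omega)
        refine ⟨x :: rest, ?_, ?_⟩
        · have s1 : (x :: t[i'] :: t[j'] :: rest).Perm (t[i'] :: x :: t[j'] :: rest) :=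
            List.Perm.swap _ _ _
          have s2 : (x :: t[j'] :: rest).Perm (t[j'] :: x :: rest) :=
            List.Perm.swap _ _ _
          simpa using (h1.cons x).trans (s1.trans (s2.cons _))
        · rw [List.modify_succ_cons, List.eraseIdx_cons_succ]
          simpa using (h2.cons x).trans (List.Perm.swap _ _ _)


-- findIdx? returns an index satisfying the predicate
lemma pv_findIdx?_some {α : Type} (pred : α → Bool) :
    ∀ (l : List α) (k : Nat), l.findIdx? pred = some k →
      ∃ hk : k < l.length, pred (l[k]'hk) = true := by
  intro l
  induction l with
  | nil =>
    intro k h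
    rw [List.findIdx?_nil] at h
    exact absurd h (by simp)
  | cons x t ih =>
    intro k h
    rw [List.findIdx?_cons] at h
    by_cases hx : pred x
    · rw [if_pos hx] at h
      cases h
      exact ⟨by simp, hx⟩
    · rw [if_neg hx] at h
      obtain ⟨k', hk', rfl⟩ := Option.map_eq_some_iff.mp h
      obtain ⟨hlt, hpred⟩ := ih k' hk'
      exact ⟨by simpa using Nat.succ_lt_succ hlt, by simpa using hpred⟩

-- membership in the flattened component lists
lemma pv_mem_flatten_comps (comps : List (List Nat × Int)) (x : Nat) :
    x ∈ (comps.map Prod.fst).flatten ↔ ∃ c ∈ comps, x ∈ c.1 := by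
  simp [List.mem_flatten]

-- distinct positions hold disjoint member lists
lemma pv_disj {comps : List (List Nat × Int)}
    (hnd : ((comps.map Prod.fst).flatten).Nodup)
    {k1 k2 : Nat} (hk1 : k1 < comps.length) (hk2 : k2 < comps.length) (hne : k1 ≠ k2) :
    List.Disjoint (comps[k1]'hk1).1 (comps[k2]'hk2).1 := by
  have hp := (List.nodup_flatten.mp hnd).2
  rw [List.pairwise_iff_getElem] at hp
  rcases Nat.lt_or_lt_of_ne hne with h | h
  · have := hp k1 k2 (by simpa using hk1) (by simpa using hk2) h
    simpa using this
  · have := hp k2 k1 (by simpa using hk2) (by simpa using hk1) h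
    exact (by simpa using this : List.Disjoint (comps[k2]'hk2).1 (comps[k1]'hk1).1).symm

-- ===== the simulation invariant between A's union-find state and B's components =====

structure CompOK (p : List Nat) (vertex edge : List Int) (c : List Nat × Int) : Prop where
  ne : c.1 ≠ []
  lt : ∀ m ∈ c.1, m < p.length
  char : ∀ a ∈ c.1, ∀ b, b < p.length → (b ∈ c.1 ↔ proot p b = proot p a)
  vert : ∀ a ∈ c.1, vertex.getD (proot p a) 0 = (c.1.length : Int)
  edg : ∀ a ∈ c.1, edge.getD (proot p a) 0 = c.2

structure InvS (n : Nat) (uf : UFState) (comps : List (List Nat × Int)) : Prop where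
  plen : uf.parent.length = n
  vlen : uf.vertex.length = n
  elen : uf.edge.length = n
  forest : Forest uf.parent
  nodup : ((comps.map Prod.fst).flatten).Nodup
  cover : ∀ x, x ∈ (comps.map Prod.fst).flatten ↔ x < n
  ok : ∀ c ∈ comps, CompOK uf.parent uf.vertex uf.edge c

-- CompOK only depends on the roots, not on the parent array itself
lemma CompOK_transfer {p p' : List Nat} {vertex edge : List Int} {c : List Nat × Int}
    (hok : CompOK p vertex edge c) (hlen : p'.length = p.length)
    (hpr : ∀ z, z < p.length → proot p' z = proot p z) :
    CompOK p' vertex edge c := by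
  refine ⟨hok.ne, ?_, ?_, ?_, ?_⟩
  · intro m hm; rw [hlen]; exact hok.lt m hm
  · intro a ha b hb
    rw [hlen] at hb
    rw [hpr b hb, hpr a (hok.lt a ha)]
    exact hok.char a ha b hb
  · intro a ha
    rw [hpr a (hok.lt a ha)]
    exact hok.vert a ha
  · intro a ha
    rw [hpr a (hok.lt a ha)]
    exact hok.edg a ha

-- the invariant survives any root-preserving reshaping of the parent array
lemma InvS_transfer {n : Nat} {uf : UFState} {comps : List (List Nat × Int)}
    (hI : InvS n uf comps) (uf' : UFState)
    (hpar : uf'.parent.length = uf.parent.length) (hfor : Forest uf'.parent)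
    (hpr : ∀ z, z < uf.parent.length → proot uf'.parent z = proot uf.parent z)
    (hv : uf'.vertex = uf.vertex) (he : uf'.edge = uf.edge) :
    InvS n uf' comps := by
  refine ⟨by rw [hpar, hI.plen], by rw [hv, hI.vlen], by rw [he, hI.elen], hfor,
    hI.nodup, hI.cover, ?_⟩
  intro c hc
  rw [hv, he]
  exact CompOK_transfer (hI.ok c hc) hpar hpr

-- ufFind, packaged
lemma ufFind_spec (uf : UFState) {d : Nat → Nat} (hg : Good d uf.parent)
    (hb : ∀ y, d y ≤ uf.parent.length) {x : Nat} (hx : x < uf.parent.length) :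
    (ufFind uf x).2 = proot uf.parent x ∧
    (ufFind uf x).1.parent.length = uf.parent.length ∧
    Good d (ufFind uf x).1.parent ∧
    (∀ y, d y ≤ (ufFind uf x).1.parent.length) ∧
    (∀ z, (ufFind uf x).1.parent.getD z 0 = z ↔ uf.parent.getD z 0 = z) ∧
    (∀ z, z < uf.parent.length → proot (ufFind uf x).1.parent z = proot uf.parent z) ∧
    (ufFind uf x).1.vertex = uf.vertex ∧ (ufFind uf x).1.edge = uf.edge ∧
    (ufFind uf x).1.part = uf.part := by
  have H := findLoop_spec uf.parent.length uf.parent x hg hb hx (hb x)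
  exact ⟨H.1, H.2.1, H.2.2.1, H.2.2.2.1, H.2.2.2.2.1, H.2.2.2.2.2, rfl, rfl, rfl⟩


-- union when both finds return the same root: only that root's edge count grows
lemma union_same_inv {n : Nat} {uf : UFState} {comps : List (List Nat × Int)}
    (hI : InvS n uf comps) {a : Nat} (ha : a < n)
    {i : Nat} (hi : i < comps.length) (hai : a ∈ (comps[i]'hi).1) :
    InvS n { uf with edge := uf.edge.modify (proot uf.parent a) (· + 1) }
      (comps.modify i (fun c => (c.1, c.2 + 1))) := by
  obtain ⟨d0, hg0⟩ := hI.forest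
  obtain ⟨d, hg, hbd⟩ := pv_normalize hg0
  have hpl := hI.plen
  have ha' : a < uf.parent.length := by rw [hpl]; exact ha
  have hra_lt : proot uf.parent a < uf.parent.length := proot_lt hg hbd ha'
  have hra_e : proot uf.parent a < uf.edge.length := by
    rw [hI.elen, ← hpl]; exact hra_lt
  have hmapfst : (comps.modify i (fun c => (c.1, c.2 + 1))).map Prod.fst = comps.map Prod.fst :=
    pv_map_fst_modify comps i _
  have hcoi := hI.ok _ (List.getElem_mem hi)
  refine ⟨hpl, hI.vlen, by rw [List.length_modify]; exact hI.elen, ⟨d, hg⟩, ?_, ?_, ?_⟩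
  · show ((comps.modify i (fun c => (c.1, c.2 + 1))).map Prod.fst).flatten.Nodup
    rw [hmapfst]; exact hI.nodup
  · intro x
    show x ∈ ((comps.modify i (fun c => (c.1, c.2 + 1))).map Prod.fst).flatten ↔ x < n
    rw [hmapfst]; exact hI.cover x
  · intro c hc
    rcases pv_mem_modify _ _ _ _ hc with ⟨hii, hceq⟩ | ⟨k, hk, hki, hceq⟩
    · subst hceq
      refine ⟨hcoi.ne, hcoi.lt, hcoi.char, hcoi.vert, ?_⟩
      intro m hm
      have hpm : proot uf.parent m = proot uf.parent a :=
        (hcoi.char a hai m (hcoi.lt m hm)).mp hm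
      show (uf.edge.modify (proot uf.parent a) (· + 1)).getD (proot uf.parent m) 0 =
        (comps[i]'hi).2 + 1
      rw [pv_getD_modify _ _ _ _ _ hra_e, if_pos hpm, hpm, hcoi.edg a hai]
    · subst hceq
      have hokc := hI.ok _ (List.getElem_mem hk)
      have hnotroot : ∀ m ∈ (comps[k]'hk).1, proot uf.parent m ≠ proot uf.parent a := by
        intro m hm heq
        have hac : a ∈ (comps[k]'hk).1 := (hokc.char m hm a ha').mpr heq.symm
        exact (pv_disj hI.nodup hk hi hki) hac hai
      refine ⟨hokc.ne, hokc.lt, hokc.char, hokc.vert, ?_⟩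
      intro m hm
      show (uf.edge.modify (proot uf.parent a) (· + 1)).getD (proot uf.parent m) 0 =
        (comps[k]'hk).2
      rw [pv_getD_modify _ _ _ _ _ hra_e, if_neg (hnotroot m hm)]
      exact hokc.edg m hm


-- union when the two finds return different roots: link, add sizes and edges;
-- on the B side the two components are concatenated
lemma union_link_inv {n : Nat} {uf : UFState} {comps : List (List Nat × Int)}
    (hI : InvS n uf comps)
    {a b i j : Nat} (ha : a < n) (hbn : b < n)
    (hi : i < comps.length) (hj : j < comps.length)
    (hai : a ∈ (comps[i]'hi).1) (hbj : b ∈ (comps[j]'hj).1) (hij : i ≠ j)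
    {rx ry : Nat}
    (hset : (rx = proot uf.parent a ∧ ry = proot uf.parent b) ∨
            (rx = proot uf.parent b ∧ ry = proot uf.parent a)) :
    InvS n
      { part := uf.part - 1,
        vertex := uf.vertex.modify ry (· + uf.vertex.getD rx 0),
        edge := uf.edge.modify ry (· + uf.edge.getD rx 0 + 1),
        parent := uf.parent.set rx ry }
      ((comps.modify i
          (fun c => (c.1 ++ (comps[j]'hj).1, c.2 + (comps[j]'hj).2 + 1))).eraseIdx j) := by
  obtain ⟨d0, hg0⟩ := hI.forest
  obtain ⟨d, hg, hbd⟩ := pv_normalize hg0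
  have hpl := hI.plen
  have ha' : a < uf.parent.length := by rw [hpl]; exact ha
  have hb' : b < uf.parent.length := by rw [hpl]; exact hbn
  have hcoi := hI.ok _ (List.getElem_mem hi)
  have hcoj := hI.ok _ (List.getElem_mem hj)
  have hrab : proot uf.parent a ≠ proot uf.parent b := by
    intro h
    have hbc : b ∈ (comps[i]'hi).1 := (hcoi.char a hai b hb').mpr h.symm
    exact (pv_disj hI.nodup hi hj hij) hbc hbj
  have hraR : uf.parent.getD (proot uf.parent a) 0 = proot uf.parent a :=
    proot_isRoot hg hbd ha'
  have hrbR : uf.parent.getD (proot uf.parent b) 0 = proot uf.parent b :=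
    proot_isRoot hg hbd hb'
  have hraL : proot uf.parent a < uf.parent.length := proot_lt hg hbd ha'
  have hrbL : proot uf.parent b < uf.parent.length := proot_lt hg hbd hb'
  have hrxR : uf.parent.getD rx 0 = rx := by
    rcases hset with ⟨h1, _⟩ | ⟨h1, _⟩ <;> rw [h1]
    exacts [hraR, hrbR]
  have hryR : uf.parent.getD ry 0 = ry := by
    rcases hset with ⟨_, h2⟩ | ⟨_, h2⟩ <;> rw [h2]
    exacts [hrbR, hraR]
  have hrxy : rx ≠ ry := by
    rcases hset with ⟨h1, h2⟩ | ⟨h1, h2⟩ <;> rw [h1, h2]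
    exacts [hrab, hrab.symm]
  have hrxL : rx < uf.parent.length := by
    rcases hset with ⟨h1, _⟩ | ⟨h1, _⟩ <;> rw [h1]
    exacts [hraL, hrbL]
  have hryL : ry < uf.parent.length := by
    rcases hset with ⟨_, h2⟩ | ⟨_, h2⟩ <;> rw [h2]
    exacts [hrbL, hraL]
  have hfra : (if proot uf.parent a = rx then ry else proot uf.parent a) = ry := by
    rcases hset with ⟨h1, h2⟩ | ⟨h1, h2⟩
    · rw [if_pos h1.symm]
    · rw [if_neg (show proot uf.parent a ≠ rx by rw [h1]; exact hrab), h2]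
  have hfrb : (if proot uf.parent b = rx then ry else proot uf.parent b) = ry := by
    rcases hset with ⟨h1, h2⟩ | ⟨h1, h2⟩
    · rw [if_neg (show proot uf.parent b ≠ rx by
        rw [h1]; exact fun hh => hrab hh.symm), h2]
    · rw [if_pos h1.symm]
  have hfother : ∀ r, r ≠ proot uf.parent a → r ≠ proot uf.parent b →
      (if r = rx then ry else r) = r := by
    intro r h1 h2
    have : r ≠ rx := by
      rcases hset with ⟨hx, _⟩ | ⟨hx, _⟩ <;> rw [hx]
      exacts [h1, h2]
    rw [if_neg this]
  have hfry : ∀ r, ((if r = rx then ry else r) = ry ↔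
      (r = proot uf.parent a ∨ r = proot uf.parent b)) := by
    intro r
    constructor
    · intro h
      by_cases hx : r = rx
      · rcases hset with ⟨h1, _⟩ | ⟨h1, _⟩
        · exact Or.inl (hx.trans h1)
        · exact Or.inr (hx.trans h1)
      · rw [if_neg hx] at h
        rcases hset with ⟨_, h2⟩ | ⟨_, h2⟩
        · exact Or.inr (h.trans h2)
        · exact Or.inl (h.trans h2)
    · intro h
      rcases h with h | h
      · rw [h]; exact hfra
      · rw [h]; exact hfrb
  obtain ⟨hfor3, hpr3⟩ := pv_link hg hbd hrxR hryR hrxy hrxL hryL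
  have hlen3 : (uf.parent.set rx ry).length = uf.parent.length := by simp
  obtain ⟨rest, hperm1, hperm2⟩ :=
    pv_surgery comps i j
      (fun c => (c.1 ++ (comps[j]'hj).1, c.2 + (comps[j]'hj).2 + 1)) hi hj hij
  have he3 : (((fun c => (c.1 ++ (comps[j]'hj).1, c.2 + (comps[j]'hj).2 + 1))
        (comps[i]'hi) :: rest).map Prod.fst).flatten =
      (((comps[i]'hi) :: (comps[j]'hj) :: rest).map Prod.fst).flatten := by
    simp [List.append_assoc]
  have hflat3 :
      ((((comps.modify i
          (fun c => (c.1 ++ (comps[j]'hj).1, c.2 + (comps[j]'hj).2 + 1))).eraseIdx j)).map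
            Prod.fst).flatten.Perm ((comps.map Prod.fst).flatten) := by
    have e1 := (hperm2.map Prod.fst).flatten
    have e2 := (hperm1.map Prod.fst).flatten
    exact e1.trans (he3 ▸ e2.symm)
  have hnodup3 := hflat3.nodup_iff.mpr hI.nodup
  have hndO : ((((comps[i]'hi) :: (comps[j]'hj) :: rest)).map Prod.fst).flatten.Nodup :=
    ((hperm1.map Prod.fst).flatten).nodup_iff.mp hI.nodup
  have hPW := (List.nodup_flatten.mp hndO).2
  rw [List.map_cons, List.map_cons, List.pairwise_cons] at hPW
  obtain ⟨hd1, hPW2⟩ := hPW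
  rw [List.pairwise_cons] at hPW2
  obtain ⟨hd2, _⟩ := hPW2
  have hdisj_i : ∀ c ∈ rest, List.Disjoint (comps[i]'hi).1 c.1 := fun c hc =>
    hd1 c.1 (List.mem_cons_of_mem _ ((List.mem_map (f := Prod.fst)).mpr ⟨c, hc, rfl⟩))
  have hdisj_j : ∀ c ∈ rest, List.Disjoint (comps[j]'hj).1 c.1 := fun c hc =>
    hd2 c.1 ((List.mem_map (f := Prod.fst)).mpr ⟨c, hc, rfl⟩)
  have hrootm_i : ∀ m ∈ (comps[i]'hi).1, proot uf.parent m = proot uf.parent a :=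
    fun m hm => (hcoi.char a hai m (hcoi.lt m hm)).mp hm
  have hrootm_j : ∀ m ∈ (comps[j]'hj).1, proot uf.parent m = proot uf.parent b :=
    fun m hm => (hcoj.char b hbj m (hcoj.lt m hm)).mp hm
  have hrest_sub : ∀ c ∈ rest, c ∈ comps := fun c hc =>
    hperm1.mem_iff.mpr (List.mem_cons_of_mem _ (List.mem_cons_of_mem _ hc))
  have hsumv : uf.vertex.getD ry 0 + uf.vertex.getD rx 0 =
      ((comps[i]'hi).1.length : Int) + ((comps[j]'hj).1.length : Int) := by
    have hva := hcoi.vert a hai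
    have hvb := hcoj.vert b hbj
    rcases hset with ⟨h1, h2⟩ | ⟨h1, h2⟩ <;> (rw [h1, h2, hva, hvb]; try ring)
  have hsume : uf.edge.getD ry 0 + uf.edge.getD rx 0 =
      (comps[i]'hi).2 + (comps[j]'hj).2 := by
    have hea := hcoi.edg a hai
    have heb := hcoj.edg b hbj
    rcases hset with ⟨h1, h2⟩ | ⟨h1, h2⟩ <;> (rw [h1, h2, hea, heb]; try ring)
  have hryV : ry < uf.vertex.length := by rw [hI.vlen, ← hpl]; exact hryL
  have hryE : ry < uf.edge.length := by rw [hI.elen, ← hpl]; exact hryL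
  refine ⟨?_, ?_, ?_, hfor3, hnodup3, ?_, ?_⟩
  · show (uf.parent.set rx ry).length = n
    rw [hlen3]; exact hpl
  · show (uf.vertex.modify ry (· + uf.vertex.getD rx 0)).length = n
    rw [List.length_modify]; exact hI.vlen
  · show (uf.edge.modify ry (· + uf.edge.getD rx 0 + 1)).length = n
    rw [List.length_modify]; exact hI.elen
  · intro x
    exact hflat3.mem_iff.trans (hI.cover x)
  · intro c hc
    rcases List.mem_cons.mp (hperm2.mem_iff.mp hc) with hceq | hcr
    · -- the merged component
      subst hceq
      show CompOK (uf.parent.set rx ry) (uf.vertex.modify ry (· + uf.vertex.getD rx 0))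
        (uf.edge.modify ry (· + uf.edge.getD rx 0 + 1))
        ((comps[i]'hi).1 ++ (comps[j]'hj).1, (comps[i]'hi).2 + (comps[j]'hj).2 + 1)
      have hr3m : ∀ m ∈ (comps[i]'hi).1 ++ (comps[j]'hj).1,
          proot (uf.parent.set rx ry) m = ry := by
        intro m hm
        rcases List.mem_append.mp hm with h | h
        · rw [hpr3 m (hcoi.lt m h), hrootm_i m h, hfra]
        · rw [hpr3 m (hcoj.lt m h), hrootm_j m h, hfrb]
      refine ⟨?_, ?_, ?_, ?_, ?_⟩
      · intro hnil
        exact hcoi.ne (List.append_eq_nil_iff.mp hnil).1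
      · intro m hm
        show m < (uf.parent.set rx ry).length
        rw [hlen3]
        rcases List.mem_append.mp hm with h | h
        · exact hcoi.lt m h
        · exact hcoj.lt m h
      · intro m hm b' hb3
        show b' ∈ (comps[i]'hi).1 ++ (comps[j]'hj).1 ↔ _
        rw [hlen3] at hb3
        rw [hr3m m hm, hpr3 b' hb3, hfry, List.mem_append,
          hcoi.char a hai b' hb3, hcoj.char b hbj b' hb3]
      · intro m hm
        show (uf.vertex.modify ry (· + uf.vertex.getD rx 0)).getD
            (proot (uf.parent.set rx ry) m) 0 = _
        rw [hr3m m hm, pv_getD_modify _ _ _ _ _ hryV, if_pos rfl, hsumv,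
          List.length_append]
        push_cast
        ring
      · intro m hm
        show (uf.edge.modify ry (· + uf.edge.getD rx 0 + 1)).getD
            (proot (uf.parent.set rx ry) m) 0 = _
        rw [hr3m m hm, pv_getD_modify _ _ _ _ _ hryE, if_pos rfl]
        rw [show uf.edge.getD ry 0 + uf.edge.getD rx 0 + 1 =
          (comps[i]'hi).2 + (comps[j]'hj).2 + 1 by rw [hsume]]
    · -- an untouched component
      have hokc := hI.ok c (hrest_sub c hcr)
      have hna : ∀ m ∈ c.1, proot uf.parent m ≠ proot uf.parent a := by
        intro m hm heq
        have hac : a ∈ c.1 := (hokc.char m hm a ha').mpr heq.symm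
        exact hdisj_i c hcr hai hac
      have hnb : ∀ m ∈ c.1, proot uf.parent m ≠ proot uf.parent b := by
        intro m hm heq
        have hbc : b ∈ c.1 := (hokc.char m hm b hb').mpr heq.symm
        exact hdisj_j c hcr hbj hbc
      have hnry : ∀ m ∈ c.1, proot uf.parent m ≠ ry := by
        intro m hm
        rcases hset with ⟨_, h2⟩ | ⟨_, h2⟩ <;> rw [h2]
        exacts [hnb m hm, hna m hm]
      refine ⟨hokc.ne, ?_, ?_, ?_, ?_⟩
      · intro m hm
        show m < (uf.parent.set rx ry).length
        rw [hlen3]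
        exact hokc.lt m hm
      · intro m hm b' hb3
        rw [show (uf.parent.set rx ry).length = uf.parent.length from hlen3] at hb3
        rw [hpr3 m (hokc.lt m hm), hfother _ (hna m hm) (hnb m hm), hpr3 b' hb3]
        constructor
        · intro h
          rw [hfother _ (hna b' h) (hnb b' h)]
          exact (hokc.char m hm b' hb3).mp h
        · intro h
          apply (hokc.char m hm b' hb3).mpr
          by_cases hx : proot uf.parent b' = rx
          · rw [if_pos hx] at h
            exact absurd h.symm (hnry m hm)
          · rw [if_neg hx] at h
            exact h
      · intro m hm
        show (uf.vertex.modify ry (· + uf.vertex.getD rx 0)).getD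
            (proot (uf.parent.set rx ry) m) 0 = _
        rw [hpr3 m (hokc.lt m hm), hfother _ (hna m hm) (hnb m hm),
          pv_getD_modify _ _ _ _ _ hryV, if_neg (hnry m hm)]
        exact hokc.vert m hm
      · intro m hm
        show (uf.edge.modify ry (· + uf.edge.getD rx 0 + 1)).getD
            (proot (uf.parent.set rx ry) m) 0 = _
        rw [hpr3 m (hokc.lt m hm), hfother _ (hna m hm) (hnb m hm),
          pv_getD_modify _ _ _ _ _ hryE, if_neg (hnry m hm)]
        exact hokc.edg m hm

-- how ufUnion evaluates, by cases
lemma ufUnion_same (uf : UFState) (x y : Nat)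
    (h : (ufFind uf x).2 = (ufFind (ufFind uf x).1 y).2) :
    (ufUnion uf x y).1 = { (ufFind (ufFind uf x).1 y).1 with
      edge := (ufFind (ufFind uf x).1 y).1.edge.modify ((ufFind uf x).2) (· + 1) } := by
  simp only [ufUnion]
  rw [if_pos h]

lemma ufUnion_diff_noswap (uf : UFState) (x y : Nat)
    (h : ¬((ufFind uf x).2 = (ufFind (ufFind uf x).1 y).2))
    (hv : ¬((ufFind (ufFind uf x).1 y).1.vertex.getD ((ufFind uf x).2) 0 >
        (ufFind (ufFind uf x).1 y).1.vertex.getD ((ufFind (ufFind uf x).1 y).2) 0)) :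
    (ufUnion uf x y).1 =
      { part := (ufFind (ufFind uf x).1 y).1.part - 1,
        vertex := (ufFind (ufFind uf x).1 y).1.vertex.modify ((ufFind (ufFind uf x).1 y).2)
          (· + (ufFind (ufFind uf x).1 y).1.vertex.getD ((ufFind uf x).2) 0),
        edge := (ufFind (ufFind uf x).1 y).1.edge.modify ((ufFind (ufFind uf x).1 y).2)
          (· + (ufFind (ufFind uf x).1 y).1.edge.getD ((ufFind uf x).2) 0 + 1),
        parent := (ufFind (ufFind uf x).1 y).1.parent.set ((ufFind uf x).2)
          ((ufFind (ufFind uf x).1 y).2) } := by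
  simp only [ufUnion]
  rw [if_neg h, if_neg hv]

lemma ufUnion_diff_swap (uf : UFState) (x y : Nat)
    (h : ¬((ufFind uf x).2 = (ufFind (ufFind uf x).1 y).2))
    (hv : (ufFind (ufFind uf x).1 y).1.vertex.getD ((ufFind uf x).2) 0 >
        (ufFind (ufFind uf x).1 y).1.vertex.getD ((ufFind (ufFind uf x).1 y).2) 0) :
    (ufUnion uf x y).1 =
      { part := (ufFind (ufFind uf x).1 y).1.part - 1,
        vertex := (ufFind (ufFind uf x).1 y).1.vertex.modify ((ufFind uf x).2)
          (· + (ufFind (ufFind uf x).1 y).1.vertex.getD ((ufFind (ufFind uf x).1 y).2) 0),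
        edge := (ufFind (ufFind uf x).1 y).1.edge.modify ((ufFind uf x).2)
          (· + (ufFind (ufFind uf x).1 y).1.edge.getD ((ufFind (ufFind uf x).1 y).2) 0 + 1),
        parent := (ufFind (ufFind uf x).1 y).1.parent.set ((ufFind (ufFind uf x).1 y).2)
          ((ufFind uf x).2) } := by
  simp only [ufUnion]
  rw [if_neg h, if_pos hv]

-- how mergeCore evaluates, by cases
lemma mergeCore_same (comps : List (List Nat × Int)) (a b : Nat) {i j : Nat}
    (hfa : comps.findIdx? (fun c => c.1.contains a) = some i)
    (hfb : comps.findIdx? (fun c => c.1.contains b) = some j) (hij : i = j) :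
    mergeCore comps a b = comps.modify i (fun c => (c.1, c.2 + 1)) := by
  unfold mergeCore
  rw [hfa, hfb]
  dsimp only
  rw [if_pos hij]

lemma mergeCore_diff (comps : List (List Nat × Int)) (a b : Nat) {i j : Nat}
    (hfa : comps.findIdx? (fun c => c.1.contains a) = some i)
    (hfb : comps.findIdx? (fun c => c.1.contains b) = some j) (hij : ¬(i = j)) :
    mergeCore comps a b =
      (comps.modify i (fun c => (c.1 ++ (comps.getD j ([], 0)).1,
        c.2 + (comps.getD j ([], 0)).2 + 1))).eraseIdx j := by
  unfold mergeCore
  rw [hfa, hfb]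
  dsimp only
  rw [if_neg hij]

-- one parallel step of A's union loop and B's merge loop
lemma step_inv {n : Nat} {uf : UFState} {comps : List (List Nat × Int)}
    (hI : InvS n uf comps) {a b : Nat} (ha : a < n) (hbn : b < n) :
    InvS n (ufUnion uf a b).1 (mergeCore comps a b) := by
  obtain ⟨d0, hg0⟩ := hI.forest
  obtain ⟨d, hg, hbd⟩ := pv_normalize hg0
  have ha' : a < uf.parent.length := by rw [hI.plen]; exact ha
  have hb' : b < uf.parent.length := by rw [hI.plen]; exact hbn
  obtain ⟨F1v, F1len, F1good, F1bd, F1roots, F1pr, F1vert, F1edge, F1part⟩ :=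
    ufFind_spec uf hg hbd ha'
  have hb1 : b < (ufFind uf a).1.parent.length := by rw [F1len]; exact hb'
  obtain ⟨F2v, F2len, F2good, F2bd, F2roots, F2pr, F2vert, F2edge, F2part⟩ :=
    ufFind_spec (ufFind uf a).1 F1good F1bd hb1
  have hpr2 : ∀ z, z < uf.parent.length →
      proot (ufFind (ufFind uf a).1 b).1.parent z = proot uf.parent z := by
    intro z hz
    rw [F2pr z (by rw [F1len]; exact hz), F1pr z hz]
  have hI2 : InvS n (ufFind (ufFind uf a).1 b).1 comps := by
    apply InvS_transfer hI _ (by rw [F2len, F1len]) ⟨d, F2good⟩ hpr2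
    · rw [F2vert, F1vert]
    · rw [F2edge, F1edge]
  have hra : (ufFind uf a).2 = proot uf.parent a := F1v
  have hrb : (ufFind (ufFind uf a).1 b).2 = proot uf.parent b := by
    rw [F2v, F1pr b hb']
  have hexA : ∃ c ∈ comps, a ∈ c.1 :=
    (pv_mem_flatten_comps comps a).mp ((hI.cover a).mpr ha)
  have hexB : ∃ c ∈ comps, b ∈ c.1 :=
    (pv_mem_flatten_comps comps b).mp ((hI.cover b).mpr hbn)
  have hfa : ∃ k, comps.findIdx? (fun c => c.1.contains a) = some k := by
    cases hopt : comps.findIdx? (fun c => c.1.contains a) with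
    | some k => exact ⟨k, rfl⟩
    | none =>
      obtain ⟨c, hc, hmem⟩ := hexA
      have hfalse := List.findIdx?_eq_none_iff.mp hopt c hc
      exact absurd (List.contains_iff_mem.mpr hmem) (by simp_all)
  have hfb : ∃ k, comps.findIdx? (fun c => c.1.contains b) = some k := by
    cases hopt : comps.findIdx? (fun c => c.1.contains b) with
    | some k => exact ⟨k, rfl⟩
    | none =>
      obtain ⟨c, hc, hmem⟩ := hexB
      have hfalse := List.findIdx?_eq_none_iff.mp hopt c hc
      exact absurd (List.contains_iff_mem.mpr hmem) (by simp_all)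
  obtain ⟨i, hfai⟩ := hfa
  obtain ⟨hi, hpa⟩ := pv_findIdx?_some _ comps i hfai
  have hai : a ∈ (comps[i]'hi).1 := List.contains_iff_mem.mp (by simpa using hpa)
  obtain ⟨j, hfbj⟩ := hfb
  obtain ⟨hj, hpb⟩ := pv_findIdx?_some _ comps j hfbj
  have hbj : b ∈ (comps[j]'hj).1 := List.contains_iff_mem.mp (by simpa using hpb)
  by_cases hroot : (ufFind uf a).2 = (ufFind (ufFind uf a).1 b).2
  · have hprab : proot uf.parent a = proot uf.parent b := by
      rw [← hra, ← hrb, hroot]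
    have hbi : b ∈ (comps[i]'hi).1 :=
      ((hI.ok _ (List.getElem_mem hi)).char a hai b hb').mpr hprab.symm
    have hij : i = j := by
      by_contra hne
      exact (pv_disj hI.nodup hi hj hne) hbi hbj
    rw [ufUnion_same uf a b hroot, mergeCore_same comps a b hfai hfbj hij]
    have hra2 : (ufFind uf a).2 = proot (ufFind (ufFind uf a).1 b).1.parent a := by
      rw [hpr2 a ha']
      exact hra
    rw [hra2]
    exact union_same_inv hI2 ha hi hai
  · have hij : i ≠ j := by
      intro h
      apply hroot
      rw [hra, hrb]
      cases h
      exact (((hI.ok _ (List.getElem_mem hi)).char a hai b hb').mp hbj).symm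
    have hmc : mergeCore comps a b =
        (comps.modify i (fun c => (c.1 ++ (comps[j]'hj).1,
          c.2 + (comps[j]'hj).2 + 1))).eraseIdx j := by
      rw [mergeCore_diff comps a b hfai hfbj hij, List.getD_eq_getElem comps ([], 0) hj]
    by_cases hsw : (ufFind (ufFind uf a).1 b).1.vertex.getD ((ufFind uf a).2) 0 >
        (ufFind (ufFind uf a).1 b).1.vertex.getD ((ufFind (ufFind uf a).1 b).2) 0
    · rw [ufUnion_diff_swap uf a b hroot hsw, hmc]
      apply union_link_inv hI2 ha hbn hi hj hai hbj hij
      right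
      constructor
      · rw [F2v, F2pr b hb1]
      · rw [hpr2 a ha']
        exact hra
    · rw [ufUnion_diff_noswap uf a b hroot hsw, hmc]
      apply union_link_inv hI2 ha hbn hi hj hai hbj hij
      left
      constructor
      · rw [hpr2 a ha']
        exact hra
      · rw [F2v, F2pr b hb1]


lemma pv_flatten_singletons (l : List Nat) : (l.map (fun i => ([i] : List Nat))).flatten = l := by
  induction l with
  | nil => rfl
  | cons x t ih => simp [ih]

lemma pv_headD_mem {l : List Nat} (h : l ≠ []) : l.headD 0 ∈ l := by
  cases l with
  | nil => exact absurd rfl h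
  | cons x t => exact List.mem_cons_self

-- the initial state: n singleton components
lemma init_inv (n : Nat) :
    InvS n (ufInit n) ((List.range n).map (fun i => ([i], (0 : Int)))) := by
  have hget : ∀ x, x < n → (List.range n).getD x 0 = x := by
    intro x hx
    rw [List.getD_eq_getElem _ _ (by simpa using hx)]
    simp
  have hroots : ∀ x, x < n → proot (List.range n) x = x := fun x hx =>
    proot_of_root (hget x hx)
  have hflat : (((List.range n).map (fun i => (([i], (0 : Int)) : List Nat × Int))).map
      Prod.fst).flatten = List.range n := by
    rw [List.map_map]
    exact pv_flatten_singletons (List.range n)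
  refine ⟨by simp [ufInit], by simp [ufInit], by simp [ufInit],
    ⟨fun _ => 0, ?_, ?_⟩, ?_, ?_, ?_⟩
  · intro x hx
    have hx' : x < n := by simpa [ufInit] using hx
    show (List.range n).getD x 0 < (List.range n).length
    rw [hget x hx']
    simpa using hx'
  · intro x hx hne
    exact absurd (hget x (by simpa [ufInit] using hx)) hne
  · show (((List.range n).map fun i => (([i], (0 : Int)) : List Nat × Int)).map
      Prod.fst).flatten.Nodup
    rw [hflat]
    exact List.nodup_range
  · intro x
    show x ∈ (((List.range n).map fun i => (([i], (0 : Int)) : List Nat × Int)).map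
      Prod.fst).flatten ↔ x < n
    rw [hflat]
    exact List.mem_range
  · intro c hc
    obtain ⟨i0, hi0, rfl⟩ := List.mem_map.mp hc
    have hi0n : i0 < n := List.mem_range.mp hi0
    refine ⟨by simp, ?_, ?_, ?_, ?_⟩
    · intro m hm
      show m < (List.range n).length
      rw [List.mem_singleton.mp hm]
      simpa using hi0n
    · intro a' ha' b' hb'
      have hb'' : b' < n := by simpa [ufInit] using hb'
      rw [List.mem_singleton.mp ha']
      show b' ∈ [i0] ↔ proot (List.range n) b' = proot (List.range n) i0
      rw [List.mem_singleton, hroots b' hb'', hroots i0 hi0n]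
    · intro a' ha'
      rw [List.mem_singleton.mp ha']
      show (List.replicate n (1 : Int)).getD (proot (List.range n) i0) 0 = _
      rw [hroots i0 hi0n, List.getD_replicate _ hi0n]
      rfl
    · intro a' ha'
      rw [List.mem_singleton.mp ha']
      show (List.replicate n (0 : Int)).getD (proot (List.range n) i0) 0 = _
      rw [hroots i0 hi0n, List.getD_replicate _ hi0n]

-- presence of a key persists along the id-building fold
lemma contains_persists :
    ∀ (pairs : List (Int × Int)) (d : PySem.Dict Int Nat) (k : Int),
      d.contains k = true →
      (pairs.foldl (fun d uv =>
        let d1 := d.setdefault uv.1 d.size; d1.setdefault uv.2 d1.size) d).contains k = true := by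
  intro pairs
  induction pairs with
  | nil => intro d k h; exact h
  | cons uv t ih =>
    intro d k h
    simp only [List.foldl_cons]
    apply ih
    rw [PySem.Dict.contains_setdefault, PySem.Dict.contains_setdefault]
    simp [h]

-- the id dictionary: every stored value is below the size, every key of a
-- processed pair is present
lemma buildId_aux :
    ∀ (pairs : List (Int × Int)) (d : PySem.Dict Int Nat),
      (∀ k v, d.get? k = some v → v < d.size) →
      (∀ k v, (pairs.foldl (fun d uv =>
          let d1 := d.setdefault uv.1 d.size; d1.setdefault uv.2 d1.size) d).get? k = some v →
        v < (pairs.foldl (fun d uv =>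
          let d1 := d.setdefault uv.1 d.size; d1.setdefault uv.2 d1.size) d).size) ∧
      (∀ uv ∈ pairs,
        (pairs.foldl (fun d uv =>
          let d1 := d.setdefault uv.1 d.size; d1.setdefault uv.2 d1.size) d).contains uv.1 = true ∧
        (pairs.foldl (fun d uv =>
          let d1 := d.setdefault uv.1 d.size; d1.setdefault uv.2 d1.size) d).contains uv.2 = true) := by
  have hsd : ∀ (d : PySem.Dict Int Nat) (k : Int),
      (∀ k' v, d.get? k' = some v → v < d.size) →
      (∀ k' v, (d.setdefault k d.size).get? k' = some v → v < (d.setdefault k d.size).size) ∧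
      (d.setdefault k d.size).contains k = true ∧
      (∀ k', d.contains k' = true → (d.setdefault k d.size).contains k' = true) := by
    intro d k hP
    by_cases hc : d.contains k = true
    · rw [PySem.Dict.setdefault_of_contains d _ hc]
      exact ⟨hP, hc, fun _ h => h⟩
    · have hcf : d.contains k = false := by simpa using hc
      rw [PySem.Dict.setdefault_of_not_contains d _ hcf]
      refine ⟨?_, ?_, ?_⟩
      · intro k' v hv
        rw [PySem.Dict.get?_insert] at hv
        rw [PySem.Dict.size_insert, hcf]
        have hle : v ≤ d.size := by
          split at hv
          · cases hv
            exact Nat.le_refl _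
          · exact Nat.le_of_lt (hP k' v hv)
        rw [if_neg (by simp)]
        omega
      · exact PySem.Dict.contains_insert_self d k _
      · intro k' h
        rw [PySem.Dict.contains_insert]
        simp [h]
  intro pairs
  induction pairs with
  | nil => intro d hP; exact ⟨hP, fun uv h => absurd h (List.not_mem_nil)⟩
  | cons uv t ih =>
    intro d hP
    simp only [List.foldl_cons]
    have h1 := hsd d uv.1 hP
    have h2 := hsd (d.setdefault uv.1 d.size) uv.2 h1.1
    have IH := ih _ h2.1
    refine ⟨IH.1, ?_⟩
    intro uv' hm
    rcases List.mem_cons.mp hm with rfl | hm'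
    · -- the processed pair's keys stay present through the rest of the fold
      constructor
      · exact contains_persists t _ _ (h2.2.2 uv'.1 h1.2.1)
      · exact contains_persists t _ _ h2.2.1
    · exact IH.2 uv' hm'


lemma buildIdA_vals (pairs : List (Int × Int)) :
    ∀ uv ∈ pairs, (buildIdA pairs).getD uv.1 0 < (buildIdA pairs).size ∧
      (buildIdA pairs).getD uv.2 0 < (buildIdA pairs).size := by
  have H := buildId_aux pairs PySem.Dict.empty
    (by intro k v hv; rw [PySem.Dict.get?_empty] at hv; cases hv)
  intro uv hm
  have h1 : (buildIdA pairs).contains uv.1 = true := (H.2 uv hm).1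
  have h2 : (buildIdA pairs).contains uv.2 = true := (H.2 uv hm).2
  constructor
  · obtain ⟨v, hv⟩ : ∃ v, (buildIdA pairs).get? uv.1 = some v :=
      Option.isSome_iff_exists.mp (by rw [← PySem.Dict.contains_eq_isSome_get?]; exact h1)
    rw [PySem.Dict.getD_of_get?_eq_some _ _ hv]
    exact H.1 uv.1 v hv
  · obtain ⟨v, hv⟩ : ∃ v, (buildIdA pairs).get? uv.2 = some v :=
      Option.isSome_iff_exists.mp (by rw [← PySem.Dict.contains_eq_isSome_get?]; exact h2)
    rw [PySem.Dict.getD_of_get?_eq_some _ _ hv]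
    exact H.1 uv.2 v hv

-- folding all pairs through A's union loop and B's merge loop in parallel
lemma fold_inv (idm : PySem.Dict Int Nat) (n : Nat) :
    ∀ (pairs : List (Int × Int)) (uf : UFState) (comps : List (List Nat × Int)),
      InvS n uf comps →
      (∀ uv ∈ pairs, idm.getD uv.1 0 < n ∧ idm.getD uv.2 0 < n) →
      InvS n
        (pairs.foldl (fun uf uv => (ufUnion uf (idm.getD uv.1 0) (idm.getD uv.2 0)).1) uf)
        (pairs.foldl (mergeStep idm) comps) := by
  intro pairs
  induction pairs with
  | nil => intro uf comps hI _; exact hI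
  | cons uv t ih =>
    intro uf comps hI hids
    simp only [List.foldl_cons]
    apply ih
    · exact step_inv hI (hids uv List.mem_cons_self).1 (hids uv List.mem_cons_self).2
    · intro uv' h
      exact hids uv' (List.mem_cons_of_mem _ h)

-- the getGroups loop: the dictionary it builds groups the indices by root,
-- and the vertex/edge arrays are untouched
lemma getGroups_loop {d : Nat → Nat} :
    ∀ (L : List Nat) (uf0 : UFState) (g0 : PySem.Dict Nat (List Nat)),
      Good d uf0.parent → (∀ y, d y ≤ uf0.parent.length) →
      (∀ x ∈ L, x < uf0.parent.length) →
      (L.foldl (fun s i =>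
          let f := ufFind s.1 i
          (f.1, s.2.modify f.2 [] (· ++ [i]))) (uf0, g0)).2 =
        L.foldl (fun g i => g.modify (proot uf0.parent i) [] (· ++ [i])) g0 ∧
      (L.foldl (fun s i =>
          let f := ufFind s.1 i
          (f.1, s.2.modify f.2 [] (· ++ [i]))) (uf0, g0)).1.edge = uf0.edge := by
  intro L
  induction L with
  | nil => intro uf0 g0 _ _ _; exact ⟨rfl, rfl⟩
  | cons x t ih =>
    intro uf0 g0 hg hbd hL
    obtain ⟨Fv, Flen, Fgood, Fbd, Froots, Fpr, Fvert, Fedge, Fpart⟩ :=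
      ufFind_spec uf0 hg hbd (hL x List.mem_cons_self)
    have hL' : ∀ y ∈ t, y < (ufFind uf0 x).1.parent.length := by
      intro y hy
      rw [Flen]
      exact hL y (List.mem_cons_of_mem _ hy)
    have IH := ih (ufFind uf0 x).1 (g0.modify ((ufFind uf0 x).2) [] (· ++ [x])) Fgood Fbd hL'
    simp only [List.foldl_cons]
    constructor
    · have step2 : List.foldl
          (fun g i => g.modify (proot (ufFind uf0 x).1.parent i) [] (· ++ [i]))
          (g0.modify ((ufFind uf0 x).2) [] (· ++ [x])) t =
        List.foldl (fun g i => g.modify (proot uf0.parent i) [] (· ++ [i]))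
          (g0.modify (proot uf0.parent x) [] (· ++ [x])) t := by
        rw [Fv]
        exact PySem.List.foldl_congr_mem t _ _ _ (fun acc y hy => by
          rw [Fpr y (hL y (List.mem_cons_of_mem _ hy))])
      exact IH.1.trans step2
    · exact IH.2.trans Fedge

lemma getGroups_spec (uf : UFState) {d : Nat → Nat} (hg : Good d uf.parent)
    (hbd : ∀ y, d y ≤ uf.parent.length) :
    (ufGetGroups uf).2 = (List.range uf.parent.length).foldl
      (fun g i => g.modify (proot uf.parent i) [] (· ++ [i])) PySem.Dict.empty ∧
    (ufGetGroups uf).1.edge = uf.edge :=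
  getGroups_loop (List.range uf.parent.length) uf PySem.Dict.empty hg hbd
    (fun x hx => by simpa using hx)


-- equality of the two final sums, given the simulation invariant
lemma final_sum {n : Nat} {uf : UFState} {comps : List (List Nat × Int)}
    (hI : InvS n uf comps) :
    (ufGetGroups uf).2.items.foldl
      (fun res rg => res + (rg.2.length : Int) -
        (if (ufGetGroups uf).1.edge.getD rg.1 0 = (rg.2.length : Int) - 1 then 1 else 0)) 0 =
    comps.foldl
      (fun r c => r + (c.1.length : Int) -
        (if c.2 = (c.1.length : Int) - 1 then 1 else 0)) 0 := by
  obtain ⟨d0, hg0⟩ := hI.forest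
  obtain ⟨d, hg, hbd⟩ := pv_normalize hg0
  obtain ⟨hG2, hGedge⟩ := getGroups_spec uf hg hbd
  have habs : (ufGetGroups uf).2 =
      ((List.range uf.parent.length).map (fun i => (proot uf.parent i, i))).foldl
        (fun g q => g.modify q.1 [] (· ++ [q.2])) PySem.Dict.empty := by
    rw [hG2, List.foldl_map]
  have hkeys : (ufGetGroups uf).2.keys =
      PySem.Set.ofList ((List.range uf.parent.length).map (fun i => proot uf.parent i)) := by
    rw [habs, PySem.Dict.keys_foldl_modify_key, PySem.Dict.keys_empty,
      PySem.Set.update_nil_left, List.map_map]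
    rfl
  have hnodupK : (ufGetGroups uf).2.keys.Nodup := by
    rw [habs]
    exact PySem.Dict.nodup_keys_foldl_modify_key _ _ _ _ _
      (by rw [PySem.Dict.keys_empty]; exact List.nodup_nil)
  have hitems : (ufGetGroups uf).2.items =
      (ufGetGroups uf).2.keys.map (fun k => (k, (ufGetGroups uf).2.getD k [])) :=
    PySem.Dict.items_eq_map_keys _ hnodupK []
  have hgetD : ∀ r, (ufGetGroups uf).2.getD r [] =
      (List.range uf.parent.length).filter (fun i => proot uf.parent i == r) := by
    intro r
    rw [habs, PySem.Dict.getD_foldl_modify_append, PySem.Dict.getD_empty,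
      List.filter_map, List.map_map]
    simp [Function.comp_def]
  have hA : (ufGetGroups uf).2.items.foldl
      (fun res rg => res + (rg.2.length : Int) -
        (if (ufGetGroups uf).1.edge.getD rg.1 0 = (rg.2.length : Int) - 1 then 1 else 0)) 0 =
      ((ufGetGroups uf).2.keys.map (fun r =>
        ((((List.range uf.parent.length).filter
            (fun i => proot uf.parent i == r)).length : Int) -
          (if uf.edge.getD r 0 = ((((List.range uf.parent.length).filter
            (fun i => proot uf.parent i == r)).length : Int)) - 1 then 1 else 0)))).sum := by
    rw [hitems, List.foldl_map, hGedge]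
    rw [PySem.List.foldl_congr_mem _ _
      (fun res r => res +
        ((((List.range uf.parent.length).filter
            (fun i => proot uf.parent i == r)).length : Int) -
          (if uf.edge.getD r 0 = ((((List.range uf.parent.length).filter
            (fun i => proot uf.parent i == r)).length : Int)) - 1 then 1 else 0))) 0
      (fun acc r _ => by rw [hgetD r]; ring)]
    rw [PySem.List.foldl_add]
    simp
  have hB : comps.foldl
      (fun r c => r + (c.1.length : Int) -
        (if c.2 = (c.1.length : Int) - 1 then 1 else 0)) 0 =
      (comps.map (fun c => ((c.1.length : Int) -
        (if c.2 = (c.1.length : Int) - 1 then 1 else 0)))).sum := by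
    rw [PySem.List.foldl_congr_mem _ _
      (fun r c => r + ((c.1.length : Int) -
        (if c.2 = (c.1.length : Int) - 1 then 1 else 0))) 0
      (fun acc c _ => by ring)]
    rw [PySem.List.foldl_add]
    simp
  rw [hA, hB]
  have hPWdisj : comps.Pairwise (fun c c' => List.Disjoint c.1 c'.1) :=
    List.pairwise_map.mp (List.nodup_flatten.mp hI.nodup).2
  have hRnodup : (comps.map (fun c => proot uf.parent (c.1.headD 0))).Nodup := by
    show (comps.map (fun c => proot uf.parent (c.1.headD 0))).Pairwise (fun a b => a ≠ b)
    rw [List.pairwise_map]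
    refine List.Pairwise.imp_of_mem ?_ hPWdisj
    intro c c' hc hc' hdisj heq
    have okc := hI.ok c hc
    have okc' := hI.ok c' hc'
    have hh : c.1.headD 0 ∈ c.1 := pv_headD_mem okc.ne
    have hh' : c'.1.headD 0 ∈ c'.1 := pv_headD_mem okc'.ne
    have hmem : c.1.headD 0 ∈ c'.1 :=
      (okc'.char (c'.1.headD 0) hh' (c.1.headD 0) (okc.lt _ hh)).mpr heq
    exact hdisj hh hmem
  have hmemKR : ∀ r, r ∈ (ufGetGroups uf).2.keys ↔
      r ∈ comps.map (fun c => proot uf.parent (c.1.headD 0)) := by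
    intro r
    rw [hkeys, PySem.Set.mem_ofList]
    constructor
    · intro hr
      obtain ⟨i0, hi0, rfl⟩ := List.mem_map.mp hr
      have hi0' : i0 < uf.parent.length := List.mem_range.mp hi0
      obtain ⟨c, hc, hmem⟩ := (pv_mem_flatten_comps comps i0).mp
        ((hI.cover i0).mpr (by rw [← hI.plen]; exact hi0'))
      have okc := hI.ok c hc
      exact List.mem_map.mpr ⟨c, hc,
        (okc.char i0 hmem (c.1.headD 0) (okc.lt _ (pv_headD_mem okc.ne))).mp
          (pv_headD_mem okc.ne)⟩
    · intro hr
      obtain ⟨c, hc, rfl⟩ := List.mem_map.mp hr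
      have okc := hI.ok c hc
      exact List.mem_map.mpr ⟨c.1.headD 0,
        List.mem_range.mpr (okc.lt _ (pv_headD_mem okc.ne)), rfl⟩
  have hperm : (ufGetGroups uf).2.keys.Perm
      (comps.map (fun c => proot uf.parent (c.1.headD 0))) :=
    (List.perm_ext_iff_of_nodup hnodupK hRnodup).mpr hmemKR
  have hpoint : ∀ c ∈ comps,
      ((((List.range uf.parent.length).filter
          (fun i => proot uf.parent i == proot uf.parent (c.1.headD 0))).length : Int) -
        (if uf.edge.getD (proot uf.parent (c.1.headD 0)) 0 =
            ((((List.range uf.parent.length).filter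
            (fun i => proot uf.parent i == proot uf.parent (c.1.headD 0))).length : Int)) - 1
          then 1 else 0)) =
      ((c.1.length : Int) - (if c.2 = (c.1.length : Int) - 1 then 1 else 0)) := by
    intro c hc
    have okc := hI.ok c hc
    have hh : c.1.headD 0 ∈ c.1 := pv_headD_mem okc.ne
    have hcnt : ((List.range uf.parent.length).filter
        (fun i => proot uf.parent i == proot uf.parent (c.1.headD 0))).length = c.1.length := by
      apply List.Perm.length_eq
      apply (List.perm_ext_iff_of_nodup (List.Nodup.filter _ List.nodup_range)
        ((List.nodup_flatten.mp hI.nodup).1 c.1 (List.mem_map.mpr ⟨c, hc, rfl⟩))).mpr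
      intro x
      rw [List.mem_filter, List.mem_range]
      constructor
      · rintro ⟨hx1, hx2⟩
        exact (okc.char (c.1.headD 0) hh x hx1).mpr (by simpa using hx2)
      · intro hx
        exact ⟨okc.lt x hx, by simpa using (okc.char (c.1.headD 0) hh x (okc.lt x hx)).mp hx⟩
    rw [hcnt, okc.edg _ hh]
  calc ((ufGetGroups uf).2.keys.map (fun r =>
        ((((List.range uf.parent.length).filter
            (fun i => proot uf.parent i == r)).length : Int) -
          (if uf.edge.getD r 0 = ((((List.range uf.parent.length).filter
            (fun i => proot uf.parent i == r)).length : Int)) - 1 then 1 else 0)))).sum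
      = ((comps.map (fun c => proot uf.parent (c.1.headD 0))).map (fun r =>
        ((((List.range uf.parent.length).filter
            (fun i => proot uf.parent i == r)).length : Int) -
          (if uf.edge.getD r 0 = ((((List.range uf.parent.length).filter
            (fun i => proot uf.parent i == r)).length : Int)) - 1 then 1 else 0)))).sum :=
        (hperm.map _).sum_eq
    _ = (comps.map (fun c => ((c.1.length : Int) -
          (if c.2 = (c.1.length : Int) - 1 then 1 else 0)))).sum := by
        rw [List.map_map]
        exact congrArg List.sum (List.map_congr_left hpoint)

-- ===== VERDICT (by name: the statement is the Claim_ definition above) =====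
theorem selectOneFromEachPair_spec : Claim_equal_selectOneFromEachPair := by
  unfold Claim_equal_selectOneFromEachPair
  intro pairs _hdom
  unfold Spec_selectOneFromEachPair
  show selectOneFromEachPair pairs = selectOneFromEachPair_alt pairs
  unfold selectOneFromEachPair selectOneFromEachPair_alt
  have hid : buildIdB pairs = buildIdA pairs := rfl
  rw [hid]
  have hIF := fold_inv (buildIdA pairs) (buildIdA pairs).size pairs
    (ufInit (buildIdA pairs).size)
    ((List.range (buildIdA pairs).size).map (fun i => ([i], (0 : Int))))
    (init_inv (buildIdA pairs).size) (buildIdA_vals pairs)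
  exact final_sum hIF
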